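-- pv_equiv track=rewrite | github.com/justinbomber/pysniffer | dbchange copy.py | modify_array
-- ===== SOURCE A (Python) =====
-- def modify_array(arr, starttimelst, endtimelst):
--     # Helper function to split the subarray based on a value if it exists within it
--     def split_subarray(subarr, value, is_starttime):
--         # If it's a starttime split, we want to split before the value, otherwise after
--         index_offset = 0 if is_starttime else 1
--         try:
--             index = subarr.index(value)
--             # Return the split parts only if the value is not at the ends as specified
--             if is_starttime and index != 0:
--                 return [subarr[:index]] + [subarr[index:]]
--             elif not is_starttime and index != len(subarr) - 1:
--                 return [subarr[:index+1]] + [subarr[index+1:]]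
--         except ValueError:
--             pass
--         # If the value was not found or at the ends, return the original subarray
--         return [subarr]
--
--     # Initialize the modified array with the original array
--     modified_arr = arr.copy()
--
--     # Process start times
--     for starttime in starttimelst:
--         new_arr = []
--         for subarr in modified_arr:
--             new_arr.extend(split_subarray(subarr, starttime, is_starttime=True))
--         modified_arr = new_arr
--
--     # Process end times
--     for endtime in endtimelst:
--         new_arr = []
--         for subarr in modified_arr:
--             new_arr.extend(split_subarray(subarr, endtime, is_starttime=False))
--         modified_arr = new_arr
--
--     # Return the modified array
--     return modified_arr
-- ===== SOURCE B (Python) =====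
-- def modify_array(arr, starttimelst, endtimelst):
--     # Per-row cut-index algorithm: one scan of each row builds a value->positions
--     # index; each start/end pass then manipulates only the sorted cut list,
--     # never rescanning row elements or materializing intermediate segments.
--     def first_occ(occ, a, b):
--         # first position in occ that is >= a, provided it is < b
--         for j in occ:
--             if j >= a:
--                 return j if j < b else None
--         return None
--
--     def merge(xs, ys):
--         # merge two sorted lists
--         out, i, j = [], 0, 0
--         while i < len(xs) and j < len(ys):
--             if xs[i] <= ys[j]:
--                 out.append(xs[i]); i += 1
--             else:
--                 out.append(ys[j]); j += 1
--         out.extend(xs[i:])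
--         out.extend(ys[j:])
--         return out
--
--     result = []
--     for row in arr:
--         pos = {}
--         for i, x in enumerate(row):
--             pos.setdefault(x, []).append(i)
--         cuts = [0, len(row)]
--         for v in starttimelst:
--             occ = pos.get(v, [])
--             new = []
--             for k in range(len(cuts) - 1):
--                 j = first_occ(occ, cuts[k], cuts[k + 1])
--                 if j is not None and j != cuts[k]:
--                     new.append(j)
--             if new:
--                 cuts = merge(cuts, new)
--         for v in endtimelst:
--             occ = pos.get(v, [])
--             new = []
--             for k in range(len(cuts) - 1):
--                 j = first_occ(occ, cuts[k], cuts[k + 1])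
--                 if j is not None and j + 1 != cuts[k + 1]:
--                     new.append(j + 1)
--             if new:
--                 cuts = merge(cuts, new)
--         for k in range(len(cuts) - 1):
--             result.append(row[cuts[k]:cuts[k + 1]])
--     return result
-- ===== Notes on version B (the rewrite author's own statement) =====
-- stated objective: alternative
-- what changed: B processes each row independently with a value->positions dict built in one scan plus a sorted cut-index list: each start/end pass only walks the cut list and the occurrence lists and merges new cut points, never rescanning row elements or materializing intermediate segment lists as A does on every pass.
import Mathlib
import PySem

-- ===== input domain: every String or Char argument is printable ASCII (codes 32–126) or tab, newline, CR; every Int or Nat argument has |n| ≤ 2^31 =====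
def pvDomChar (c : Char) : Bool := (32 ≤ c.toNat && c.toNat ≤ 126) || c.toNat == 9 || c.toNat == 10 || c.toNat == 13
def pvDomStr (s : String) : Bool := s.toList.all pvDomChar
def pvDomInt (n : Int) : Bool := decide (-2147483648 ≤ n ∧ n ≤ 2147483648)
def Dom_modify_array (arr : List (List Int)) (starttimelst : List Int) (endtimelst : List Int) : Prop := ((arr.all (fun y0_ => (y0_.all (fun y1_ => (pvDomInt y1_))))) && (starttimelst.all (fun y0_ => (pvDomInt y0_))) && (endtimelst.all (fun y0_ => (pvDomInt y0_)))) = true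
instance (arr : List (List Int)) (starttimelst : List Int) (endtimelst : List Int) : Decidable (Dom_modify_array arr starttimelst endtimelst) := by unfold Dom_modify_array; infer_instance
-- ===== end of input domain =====

-- B replaces A's repeated segment-rescanning passes by per-row cut-index maintenance over a
-- value->positions dict (alternative decomposition; same observable behaviour, proved equal).


-- ===== PORT A =====
def splitSubarray (subarr : List Int) (value : Int) (isStart : Bool) : List (List Int) :=
  match PySem.List.index? subarr value with
  | some index =>
      if isStart then
        if index ≠ 0 then
          [PySem.List.slice subarr none (some (index : Int)),
           PySem.List.slice subarr (some (index : Int)) none]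
        else [subarr]   -- value at the start: fall through to "return [subarr]"
      else
        if (index : Int) ≠ (subarr.length : Int) - 1 then
          [PySem.List.slice subarr none (some ((index : Int) + 1)),
           PySem.List.slice subarr (some ((index : Int) + 1)) none]
        else [subarr]
  | none => [subarr]    -- ValueError: value not found

def modify_array (arr : List (List Int)) (starttimelst : List Int) (endtimelst : List Int) : List (List Int) :=
  let m1 := starttimelst.foldl
    (fun m v => m.foldl (fun acc sub => acc ++ splitSubarray sub v true) []) arr
  endtimelst.foldl
    (fun m v => m.foldl (fun acc sub => acc ++ splitSubarray sub v false) []) m1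

-- ===== PORT B =====
-- first position in occ that is >= a, provided it is < b  (Source B: first_occ)
def firstOcc (occ : List Nat) (a b : Nat) : Option Nat :=
  match occ with
  | [] => none
  | j :: rest => if a ≤ j then (if j < b then some j else none) else firstOcc rest a b

-- merge two sorted lists (Source B: merge)
def mergeCuts : List Nat → List Nat → List Nat
  | xs, [] => xs
  | [], ys => ys
  | x :: xs, y :: ys => if x ≤ y then x :: mergeCuts xs (y :: ys) else y :: mergeCuts (x :: xs) ys

-- Source B: the `for k in range(len(cuts)-1)` loop of a start pass, as recursion over adjacent pairs
def newStartCuts (occ : List Nat) : List Nat → List Nat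
  | a :: b :: rest =>
      (match firstOcc occ a b with
       | some j => if j ≠ a then [j] else []
       | none => []) ++ newStartCuts occ (b :: rest)
  | _ => []

-- Source B: the same loop of an end pass (cut after the occurrence)
def newEndCuts (occ : List Nat) : List Nat → List Nat
  | a :: b :: rest =>
      (match firstOcc occ a b with
       | some j => if j + 1 ≠ b then [j + 1] else []
       | none => []) ++ newEndCuts occ (b :: rest)
  | _ => []

-- Source B: pos = {}; for i, x in enumerate(row): pos.setdefault(x, []).append(i)
-- enumerate's (i, x) pairs are represented value-first via zipIdx with the index as Nat
-- (exact: the indices are 0..len-1, all nonnegative), and setdefault-append is Dict.modify.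
def buildPos (row : List Int) : PySem.Dict Int (List Nat) :=
  row.zipIdx.foldl (fun d p => d.modify p.1 [] (· ++ [p.2])) PySem.Dict.empty

-- Source B: result.append(row[cuts[k]:cuts[k+1]]) — row[a:b] with 0 ≤ a ≤ b is drop/take
-- (exact: PySem.List.slice_natCast)
def segsB (row : List Int) : List Nat → List (List Int)
  | a :: b :: rest => (row.drop a).take (b - a) :: segsB row (b :: rest)
  | _ => []

def modify_array_alt (arr : List (List Int)) (starttimelst : List Int) (endtimelst : List Int) : List (List Int) :=
  arr.foldl (fun result row =>
    let pos := buildPos row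
    let cuts0 : List Nat := [0, row.length]
    let cuts1 := starttimelst.foldl (fun cuts v =>
        let nw := newStartCuts (pos.getD v []) cuts
        if nw = [] then cuts else mergeCuts cuts nw) cuts0
    let cuts2 := endtimelst.foldl (fun cuts v =>
        let nw := newEndCuts (pos.getD v []) cuts
        if nw = [] then cuts else mergeCuts cuts nw) cuts1
    result ++ segsB row cuts2) []

-- ===== PRECONDITION & SPEC =====
def Spec_modify_array (arr : List (List Int)) (starttimelst : List Int) (endtimelst : List Int) (out : List (List Int)) : Prop := out = modify_array_alt arr starttimelst endtimelst
instance (arr : List (List Int)) (starttimelst : List Int) (endtimelst : List Int) (out : List (List Int)) : Decidable (Spec_modify_array arr starttimelst endtimelst out) := by unfold Spec_modify_array; infer_instance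

-- ===== CLAIM (what is proved, stated in full; the proofs are below) =====
def Claim_equal_modify_array : Prop := ∀ (arr : List (List Int)) (starttimelst : List Int) (endtimelst : List Int), Dom_modify_array arr starttimelst endtimelst → Spec_modify_array arr starttimelst endtimelst (modify_array arr starttimelst endtimelst)

-- ===== LEMMAS AND PROOFS =====

-- positions of v in a list, in increasing order (specification device)
def posList (v : Int) : List Int → List Nat
  | [] => []
  | x :: t => if x = v then 0 :: (posList v t).map (· + 1) else (posList v t).map (· + 1)

-- the segment of row between cut indices a and b
def seg (row : List Int) (a b : Nat) : List Int := (row.drop a).take (b - a)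

-- abstract "cut chooser" form of the two inner loops
def startCut (occ : List Nat) (a b : Nat) : Option Nat :=
  match firstOcc occ a b with
  | some j => if j = a then none else some j
  | none => none

def endCut (occ : List Nat) (a b : Nat) : Option Nat :=
  match firstOcc occ a b with
  | some j => if j + 1 = b then none else some (j + 1)
  | none => none

def genNew (f : Nat → Nat → Option Nat) : List Nat → List Nat
  | a :: b :: rest => (f a b).toList ++ genNew f (b :: rest)
  | _ => []

lemma newStartCuts_eq (occ : List Nat) (cuts : List Nat) :
    newStartCuts occ cuts = genNew (startCut occ) cuts := by
  induction cuts with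
  | nil => rfl
  | cons a tl ih =>
    cases tl with
    | nil => rfl
    | cons b rest =>
      simp only [newStartCuts, genNew]
      rw [ih]
      congr 1
      cases h : firstOcc occ a b with
      | none => simp [startCut, h]
      | some j =>
        by_cases hj : j = a <;> simp [startCut, h, hj]

lemma newEndCuts_eq (occ : List Nat) (cuts : List Nat) :
    newEndCuts occ cuts = genNew (endCut occ) cuts := by
  induction cuts with
  | nil => rfl
  | cons a tl ih =>
    cases tl with
    | nil => rfl
    | cons b rest =>
      simp only [newEndCuts, genNew]
      rw [ih]
      congr 1
      cases h : firstOcc occ a b with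
      | none => simp [endCut, h]
      | some j =>
        by_cases hj : j + 1 = b <;> simp [endCut, h, hj]

lemma mergeCuts_nil (xs : List Nat) : mergeCuts xs [] = xs := by
  cases xs <;> simp [mergeCuts]

lemma map_shift (l : List Nat) (a b : Nat) :
    (l.map (· + a)).map (· + b) = l.map (· + (a + b)) := by
  rw [List.map_map]; apply List.map_congr_left; intro y _; simp; omega

lemma posList_map_lt (v : Int) (xs : List Int) : ∀ j ∈ posList v xs, j < xs.length := by
  induction xs with
  | nil => simp [posList]
  | cons x t ih =>
    intro j hj
    simp only [posList] at hj
    have hmem : j = 0 ∨ ∃ j' ∈ posList v t, j' + 1 = j := by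
      split_ifs at hj with h
      · rcases List.mem_cons.1 hj with rfl | hj'
        · exact Or.inl rfl
        · right; simpa using List.mem_map.1 hj'
      · right; simpa using List.mem_map.1 hj
    rcases hmem with rfl | ⟨j', hj', rfl⟩
    · simp
    · have := ih j' hj'; simp; omega

lemma posList_append (v : Int) (xs ys : List Int) :
    posList v (xs ++ ys) = posList v xs ++ (posList v ys).map (· + xs.length) := by
  induction xs with
  | nil => simp [posList]
  | cons x t ih =>
    by_cases h : x = v
    · subst h
      simp only [List.cons_append, posList, if_pos rfl, ih, List.map_append, map_shift,
        List.length_cons, if_true, eq_self_iff_true]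
    · simp only [List.cons_append, posList, if_neg h, ih, List.map_append, map_shift,
        List.length_cons]

lemma index?_eq_head_posList (v : Int) (xs : List Int) :
    PySem.List.index? xs v = (posList v xs).head? := by
  induction xs with
  | nil => simp [posList, PySem.List.index?]
  | cons x t ih =>
    by_cases h : x = v
    · subst h; rw [PySem.List.index?_cons_self]; simp [posList]
    · rw [PySem.List.index?_cons_of_ne t h]
      rw [PySem.List.index?_eq_idxOf?] at ih
      simp [posList, h, List.head?_map, ih]

lemma posList_zipIdx (v : Int) (row : List Int) : ∀ k : Nat,
    ((row.zipIdx k).filter (fun p => p.1 == v)).map (·.2) = (posList v row).map (· + k) := by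
  induction row with
  | nil => intro k; simp [posList]
  | cons x t ih =>
    intro k
    rw [List.zipIdx_cons]
    by_cases h : x = v <;>
      simp [h, posList, ih (k + 1), List.map_map] <;>
      (intro a _; omega)

lemma getD_buildPos (row : List Int) (v : Int) :
    (buildPos row).getD v [] = posList v row := by
  unfold buildPos
  rw [PySem.Dict.getD_foldl_modify_append, PySem.Dict.getD_empty, List.nil_append,
      posList_zipIdx v row 0]
  simp

lemma firstOcc_some_bounds (occ : List Nat) (a b j : Nat) :
    firstOcc occ a b = some j → a ≤ j ∧ j < b := by
  induction occ with
  | nil => simp [firstOcc]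
  | cons j' rest ih =>
    simp only [firstOcc]
    split_ifs with h1 h2 <;> intro h
    · cases h; omega
    · cases h
    · exact ih h

lemma firstOcc_append_lt (xs ys : List Nat) (a b : Nat) (h : ∀ x ∈ xs, x < a) :
    firstOcc (xs ++ ys) a b = firstOcc ys a b := by
  induction xs with
  | nil => simp
  | cons x t ih =>
    have hx : x < a := h x (by simp)
    simp only [List.cons_append, firstOcc]
    rw [if_neg (by omega)]
    exact ih (fun y hy => h y (by simp [hy]))

lemma firstOcc_ge_none (l : List Nat) (a b : Nat) (h : ∀ x ∈ l, b ≤ x) :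
    firstOcc l a b = none := by
  induction l with
  | nil => rfl
  | cons j rest ih =>
    have hj : b ≤ j := h j (by simp)
    simp only [firstOcc]
    split_ifs with h1 h2
    · omega
    · rfl
    · exact ih (fun y hy => h y (by simp [hy]))

lemma seg_length (row : List Int) (a b : Nat) (hab : a ≤ b) (hbn : b ≤ row.length) :
    (seg row a b).length = b - a := by
  unfold seg
  rw [List.length_take, List.length_drop]
  omega

lemma firstOcc_posList (row : List Int) (v : Int) (a b : Nat) (hab : a ≤ b) (hbn : b ≤ row.length) :
    firstOcc (posList v row) a b = (posList v (seg row a b)).head?.map (· + a) := by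
  have hta : (row.take a).length = a := by rw [List.length_take]; omega
  have h1 : posList v row = posList v (row.take a) ++ (posList v (row.drop a)).map (· + a) := by
    conv_lhs => rw [← List.take_append_drop a row]
    rw [posList_append]
    simp only [hta]
  have hdrop : row.drop a = seg row a b ++ row.drop b := by
    unfold seg
    conv_lhs => rw [← List.take_append_drop (b - a) (row.drop a)]
    congr 1
    rw [List.drop_drop]
    congr 1; omega
  have h2 : posList v (row.drop a) = posList v (seg row a b)
      ++ (posList v (row.drop b)).map (· + (b - a)) := by
    conv_lhs => rw [hdrop]
    rw [posList_append, seg_length row a b hab hbn]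
  rw [h1, firstOcc_append_lt]
  · rw [h2, List.map_append, map_shift]
    cases hp : posList v (seg row a b) with
    | nil =>
      simp only [List.map_nil, List.nil_append, List.head?_nil, Option.map_none]
      apply firstOcc_ge_none
      intro x hx
      obtain ⟨y, _, rfl⟩ := List.mem_map.1 hx
      omega
    | cons j0 tl =>
      have hj0 : j0 < b - a := by
        have := posList_map_lt v (seg row a b) j0 (by rw [hp]; simp)
        rwa [seg_length row a b hab hbn] at this
      simp only [List.map_cons, List.cons_append, List.head?_cons, Option.map_some]
      simp only [firstOcc]
      rw [if_pos (by omega), if_pos (by omega)]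
  · intro x hx
    have := posList_map_lt v (row.take a) x hx
    rw [List.length_take] at this; omega

-- how a chosen cut point c inside [a,b) transforms the segment (specification device)
def cutApply (row : List Int) (a b : Nat) : Option Nat → List (List Int)
  | some c => [seg row a c, seg row c b]
  | none => [seg row a b]

lemma splitSubarray_true (sub : List Int) (v : Int) :
    splitSubarray sub v true =
      (match PySem.List.index? sub v with
       | some index =>
           if index ≠ 0 then
             [PySem.List.slice sub none (some (index : Int)),
              PySem.List.slice sub (some (index : Int)) none]
           else [sub]
       | none => [sub]) := by
  unfold splitSubarray
  cases PySem.List.index? sub v <;> simp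

lemma splitSubarray_false (sub : List Int) (v : Int) :
    splitSubarray sub v false =
      (match PySem.List.index? sub v with
       | some index =>
           if (index : Int) ≠ (sub.length : Int) - 1 then
             [PySem.List.slice sub none (some ((index : Int) + 1)),
              PySem.List.slice sub (some ((index : Int) + 1)) none]
           else [sub]
       | none => [sub]) := by
  unfold splitSubarray
  cases PySem.List.index? sub v <;> simp

lemma bridge_start (row : List Int) (v : Int) (a b : Nat) (hab : a ≤ b) (hbn : b ≤ row.length) :
    splitSubarray (seg row a b) v true = cutApply row a b (startCut (posList v row) a b) := by
  have hidx : PySem.List.index? (seg row a b) v = (posList v (seg row a b)).head? :=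
    index?_eq_head_posList v (seg row a b)
  have hfo := firstOcc_posList row v a b hab hbn
  rw [splitSubarray_true]
  unfold startCut
  cases hp : (posList v (seg row a b)).head? with
  | none =>
    rw [hp] at hidx hfo
    simp only [Option.map_none] at hfo
    rw [hidx, hfo]
    rfl
  | some i =>
    rw [hp] at hidx hfo
    simp only [Option.map_some] at hfo
    have hi : i < b - a := by
      have hmem : i ∈ posList v (seg row a b) := List.mem_of_mem_head? (by rw [hp]; rfl)
      have := posList_map_lt v (seg row a b) i hmem
      rwa [seg_length row a b hab hbn] at this
    have htake : (seg row a b).take i = seg row a (i + a) := by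
      show ((row.drop a).take (b - a)).take i = (row.drop a).take (i + a - a)
      rw [List.take_take]
      congr 1; omega
    have hdropi : (seg row a b).drop i = seg row (i + a) b := by
      show ((row.drop a).take (b - a)).drop i = (row.drop (i + a)).take (b - (i + a))
      rw [List.drop_take, List.drop_drop]
      congr 1
      · omega
      · congr 1; omega
    rw [hidx, hfo]
    show (if i ≠ 0 then
        [PySem.List.slice (seg row a b) none (some (i : Int)),
         PySem.List.slice (seg row a b) (some (i : Int)) none]
      else [seg row a b])
      = cutApply row a b (if i + a = a then none else some (i + a))
    by_cases h0 : i = 0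
    · subst h0
      rw [if_pos (show (0 : Nat) + a = a by omega), if_neg (show ¬ (0 : Nat) ≠ 0 by omega)]
      rfl
    · rw [if_neg (show ¬ i + a = a by omega), if_pos (show i ≠ 0 from h0)]
      rw [PySem.List.slice_to_natCast, PySem.List.slice_from_natCast, htake, hdropi]
      rfl

lemma bridge_end (row : List Int) (v : Int) (a b : Nat) (hab : a ≤ b) (hbn : b ≤ row.length) :
    splitSubarray (seg row a b) v false = cutApply row a b (endCut (posList v row) a b) := by
  have hidx : PySem.List.index? (seg row a b) v = (posList v (seg row a b)).head? :=
    index?_eq_head_posList v (seg row a b)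
  have hfo := firstOcc_posList row v a b hab hbn
  have hlen : (seg row a b).length = b - a := seg_length row a b hab hbn
  rw [splitSubarray_false]
  unfold endCut
  cases hp : (posList v (seg row a b)).head? with
  | none =>
    rw [hp] at hidx hfo
    simp only [Option.map_none] at hfo
    rw [hidx, hfo]
    rfl
  | some i =>
    rw [hp] at hidx hfo
    simp only [Option.map_some] at hfo
    have hi : i < b - a := by
      have hmem : i ∈ posList v (seg row a b) := List.mem_of_mem_head? (by rw [hp]; rfl)
      have := posList_map_lt v (seg row a b) i hmem
      rwa [seg_length row a b hab hbn] at this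
    have htake : (seg row a b).take (i + 1) = seg row a (i + a + 1) := by
      show ((row.drop a).take (b - a)).take (i + 1) = (row.drop a).take (i + a + 1 - a)
      rw [List.take_take]
      congr 1; omega
    have hdropi : (seg row a b).drop (i + 1) = seg row (i + a + 1) b := by
      show ((row.drop a).take (b - a)).drop (i + 1) = (row.drop (i + a + 1)).take (b - (i + a + 1))
      rw [List.drop_take, List.drop_drop]
      congr 1
      · omega
      · congr 1; omega
    rw [hidx, hfo]
    show (if (i : Int) ≠ ((seg row a b).length : Int) - 1 then
        [PySem.List.slice (seg row a b) none (some ((i : Int) + 1)),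
         PySem.List.slice (seg row a b) (some ((i : Int) + 1)) none]
      else [seg row a b])
      = cutApply row a b (if i + a + 1 = b then none else some (i + a + 1))
    rw [hlen]
    by_cases hc : i + a + 1 = b
    · rw [if_pos (show i + a + 1 = b from hc),
        if_neg (show ¬ ((i : Int) ≠ ((b - a : Nat) : Int) - 1) by omega)]
      rfl
    · rw [if_neg (show ¬ i + a + 1 = b from hc),
        if_pos (show (i : Int) ≠ ((b - a : Nat) : Int) - 1 by omega)]
      have hcast : ((i : Int) + 1) = ((i + 1 : Nat) : Int) := by push_cast; ring
      rw [hcast, PySem.List.slice_to_natCast, PySem.List.slice_from_natCast, htake, hdropi]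
      rfl

lemma startCut_lt (occ : List Nat) (a b c : Nat) (h : startCut occ a b = some c) :
    a < c ∧ c < b := by
  unfold startCut at h
  cases hfo : firstOcc occ a b with
  | none => rw [hfo] at h; simp at h
  | some j =>
    rw [hfo] at h
    replace h : (if j = a then none else some j) = some c := h
    have hjb := firstOcc_some_bounds occ a b j hfo
    by_cases hj : j = a
    · rw [if_pos hj] at h; cases h
    · rw [if_neg hj] at h
      cases h
      omega

lemma endCut_lt (occ : List Nat) (a b c : Nat) (h : endCut occ a b = some c) :
    a < c ∧ c < b := by
  unfold endCut at h
  cases hfo : firstOcc occ a b with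
  | none => rw [hfo] at h; simp at h
  | some j =>
    rw [hfo] at h
    replace h : (if j + 1 = b then none else some (j + 1)) = some c := h
    have hjb := firstOcc_some_bounds occ a b j hfo
    by_cases hj : j + 1 = b
    · rw [if_pos hj] at h; cases h
    · rw [if_neg hj] at h
      cases h
      omega
lemma genNew_nil (f : Nat → Nat → Option Nat) : genNew f [] = [] := rfl

lemma genNew_single (f : Nat → Nat → Option Nat) (a : Nat) : genNew f [a] = [] := rfl

lemma genNew_cons₂ (f : Nat → Nat → Option Nat) (a b : Nat) (rest : List Nat) :
    genNew f (a :: b :: rest) = (f a b).toList ++ genNew f (b :: rest) := rfl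

lemma segsB_nil (row : List Int) : segsB row [] = [] := rfl

lemma segsB_cons₂ (row : List Int) (a b : Nat) (rest : List Nat) :
    segsB row (a :: b :: rest) = seg row a b :: segsB row (b :: rest) := rfl

lemma genNew_gt (f : Nat → Nat → Option Nat)
    (hf : ∀ a b c, f a b = some c → a < c ∧ c < b) :
    ∀ (cuts : List Nat), cuts.IsChain (· ≤ ·) →
      ∀ x ∈ genNew f cuts, ∀ h ∈ cuts.head?, h < x := by
  intro cuts
  induction cuts with
  | nil => intro _ x hx; simp [genNew_nil] at hx
  | cons a tl ih =>
    intro hch x hx h hh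
    simp only [List.head?_cons, Option.mem_some_iff] at hh
    subst hh
    cases tl with
    | nil => simp [genNew_single] at hx
    | cons b rest =>
      have hab : a ≤ b := (List.isChain_cons_cons.1 hch).1
      have hch' := (List.isChain_cons_cons.1 hch).2
      rw [genNew_cons₂] at hx
      rcases List.mem_append.1 hx with hx1 | hx1
      · cases hfab : f a b with
        | none => rw [hfab] at hx1; simp at hx1
        | some c =>
          rw [hfab] at hx1
          simp only [Option.toList_some, List.mem_singleton] at hx1
          subst hx1
          exact (hf a b x hfab).1
      · have := ih hch' x hx1 b (by simp)
        omega

lemma passLem (row : List Int) (f : Nat → Nat → Option Nat) (splitf : List Int → List (List Int))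
    (hsplit : ∀ a b, a ≤ b → b ≤ row.length → splitf (seg row a b) = cutApply row a b (f a b))
    (hf : ∀ a b c, f a b = some c → a < c ∧ c < b) :
    ∀ cuts : List Nat, cuts.IsChain (· ≤ ·) → (∀ x ∈ cuts, x ≤ row.length) →
      (segsB row cuts).flatMap splitf = segsB row (mergeCuts cuts (genNew f cuts))
      ∧ (mergeCuts cuts (genNew f cuts)).IsChain (· ≤ ·)
      ∧ (mergeCuts cuts (genNew f cuts)).head? = cuts.head?
      ∧ (∀ x ∈ mergeCuts cuts (genNew f cuts), x ≤ row.length) := by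
  intro cuts
  induction cuts with
  | nil =>
    intro hch hbd
    refine ⟨?_, ?_, ?_, ?_⟩ <;> simp [genNew_nil, mergeCuts_nil, segsB_nil]
  | cons a tl ih =>
    intro hch hbd
    cases tl with
    | nil =>
      refine ⟨?_, ?_, ?_, ?_⟩
      · rw [genNew_single, mergeCuts_nil]; rfl
      · rw [genNew_single, mergeCuts_nil]; exact hch
      · rw [genNew_single, mergeCuts_nil]
      · rw [genNew_single, mergeCuts_nil]; exact hbd
    | cons b rest =>
      have hab : a ≤ b := (List.isChain_cons_cons.1 hch).1
      have hch' := (List.isChain_cons_cons.1 hch).2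
      have hbd' : ∀ x ∈ b :: rest, x ≤ row.length := fun x hx => hbd x (by simp [hx])
      have hbn : b ≤ row.length := hbd' b (by simp)
      obtain ⟨ihEq, ihCh, ihHd, ihBd⟩ := ih hch' hbd'
      obtain ⟨M', hM'⟩ : ∃ M', mergeCuts (b :: rest) (genNew f (b :: rest)) = b :: M' := by
        cases hM : mergeCuts (b :: rest) (genNew f (b :: rest)) with
        | nil => rw [hM] at ihHd; simp at ihHd
        | cons m0 M' =>
          rw [hM] at ihHd
          simp only [List.head?_cons, Option.some.injEq] at ihHd
          exact ⟨M', by rw [ihHd]⟩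
      have hgt : ∀ x ∈ genNew f (b :: rest), b < x := by
        intro x hx
        exact genNew_gt f hf (b :: rest) hch' x hx b (by simp)
      rw [hM'] at ihEq ihCh ihBd
      cases hfab : f a b with
      | none =>
        have hmg : mergeCuts (a :: b :: rest) (genNew f (a :: b :: rest)) = a :: b :: M' := by
          rw [genNew_cons₂, hfab, Option.toList_none, List.nil_append, ← hM']
          cases hgn : genNew f (b :: rest) with
          | nil => rw [mergeCuts_nil, mergeCuts_nil]
          | cons g gs =>
            have hbg : b < g := hgt g (by rw [hgn]; simp)
            show mergeCuts (a :: b :: rest) (g :: gs) = a :: mergeCuts (b :: rest) (g :: gs)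
            simp [mergeCuts, if_pos (show a ≤ g by omega)]
        refine ⟨?_, ?_, ?_, ?_⟩
        · rw [segsB_cons₂, List.flatMap_cons, hsplit a b hab hbn, hfab, hmg, segsB_cons₂, ihEq]
          simp [cutApply]
        · rw [hmg]
          exact List.isChain_cons_cons.2 ⟨hab, ihCh⟩
        · rw [hmg]; simp
        · rw [hmg]
          intro x hx
          rcases List.mem_cons.1 hx with rfl | hx'
          · exact hbd x (by simp)
          · exact ihBd x hx'
      | some c =>
        obtain ⟨hac, hcb⟩ := hf a b c hfab
        have hmg : mergeCuts (a :: b :: rest) (genNew f (a :: b :: rest)) = a :: c :: b :: M' := by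
          rw [genNew_cons₂, hfab, Option.toList_some, List.cons_append, ← hM']
          cases hgn : genNew f (b :: rest) with
          | nil =>
            rw [mergeCuts_nil]
            simp [mergeCuts, show a ≤ c by omega, show ¬ b ≤ c by omega]
          | cons g gs =>
            have hbg : b < g := hgt g (by rw [hgn]; simp)
            simp [mergeCuts, show a ≤ c by omega, show ¬ b ≤ c by omega]
        refine ⟨?_, ?_, ?_, ?_⟩
        · rw [segsB_cons₂, List.flatMap_cons, hsplit a b hab hbn, hfab, hmg, segsB_cons₂,
            segsB_cons₂, ihEq]
          simp [cutApply]
        · rw [hmg]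
          exact List.isChain_cons_cons.2 ⟨by omega,
            List.isChain_cons_cons.2 ⟨by omega, ihCh⟩⟩
        · rw [hmg]; simp
        · rw [hmg]
          intro x hx
          rcases List.mem_cons.1 hx with rfl | hx'
          · exact hbd x (by simp)
          · rcases List.mem_cons.1 hx' with rfl | hx''
            · omega
            · exact ihBd x hx''

-- one whole pass-family fold (A's outer loop over values vs B's cut-list fold)
lemma foldPass (row : List Int) (isStart : Bool)
    (cutF : List Nat → Nat → Nat → Option Nat)
    (newF : List Nat → List Nat → List Nat)
    (hnew : ∀ occ cuts, newF occ cuts = genNew (cutF occ) cuts)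
    (hbr : ∀ v a b, a ≤ b → b ≤ row.length →
        splitSubarray (seg row a b) v isStart = cutApply row a b (cutF (posList v row) a b))
    (hlt : ∀ occ a b c, cutF occ a b = some c → a < c ∧ c < b)
    (vs : List Int) :
    ∀ cuts : List Nat, cuts.IsChain (· ≤ ·) → (∀ x ∈ cuts, x ≤ row.length) →
      vs.foldl (fun m v => m.foldl (fun acc sub => acc ++ splitSubarray sub v isStart) []) (segsB row cuts)
        = segsB row (vs.foldl (fun cuts v =>
            let nw := newF ((buildPos row).getD v []) cuts
            if nw = [] then cuts else mergeCuts cuts nw) cuts)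
      ∧ (vs.foldl (fun cuts v =>
            let nw := newF ((buildPos row).getD v []) cuts
            if nw = [] then cuts else mergeCuts cuts nw) cuts).IsChain (· ≤ ·)
      ∧ (∀ x ∈ vs.foldl (fun cuts v =>
            let nw := newF ((buildPos row).getD v []) cuts
            if nw = [] then cuts else mergeCuts cuts nw) cuts, x ≤ row.length) := by
  induction vs with
  | nil => intro cuts hch hbd; exact ⟨rfl, hch, hbd⟩
  | cons v vs ih =>
    intro cuts hch hbd
    obtain ⟨hEq, hCh, hHd, hBd⟩ :=
      passLem row (cutF (posList v row)) (fun sub => splitSubarray sub v isStart)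
        (fun a b h1 h2 => hbr v a b h1 h2) (fun a b c => hlt (posList v row) a b c)
        cuts hch hbd
    have hstep : (let nw := newF ((buildPos row).getD v []) cuts
        if nw = [] then cuts else mergeCuts cuts nw)
        = mergeCuts cuts (genNew (cutF (posList v row)) cuts) := by
      show (if newF ((buildPos row).getD v []) cuts = [] then cuts
        else mergeCuts cuts (newF ((buildPos row).getD v []) cuts)) = _
      rw [getD_buildPos, hnew]
      by_cases hz : genNew (cutF (posList v row)) cuts = []
      · rw [if_pos hz, hz, mergeCuts_nil]
      · rw [if_neg hz]
    simp only [List.foldl_cons]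
    rw [PySem.List.foldl_append_eq_flatMap, List.nil_append, hEq, hstep]
    exact ih (mergeCuts cuts (genNew (cutF (posList v row)) cuts)) hCh hBd

-- A's full pass pipeline, named (definitionally A's body / reusable in the proofs)
def passFold (bb : Bool) (vs : List Int) (m : List (List Int)) : List (List Int) :=
  vs.foldl (fun m v => m.foldl (fun acc sub => acc ++ splitSubarray sub v bb) []) m

lemma passFold_nil (bb : Bool) (vs : List Int) : passFold bb vs [] = [] := by
  induction vs with
  | nil => rfl
  | cons v vs ih =>
    show vs.foldl _ (List.foldl _ [] []) = []
    exact ih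

lemma foldPass_append (bb : Bool) (vs : List Int) :
    ∀ xs ys : List (List Int), passFold bb vs (xs ++ ys) = passFold bb vs xs ++ passFold bb vs ys := by
  induction vs with
  | nil => intro xs ys; rfl
  | cons v vs ih =>
    intro xs ys
    show passFold bb vs ((xs ++ ys).foldl _ []) = passFold bb vs (xs.foldl _ []) ++ passFold bb vs (ys.foldl _ [])
    rw [PySem.List.foldl_append_eq_flatMap, PySem.List.foldl_append_eq_flatMap,
      PySem.List.foldl_append_eq_flatMap, List.nil_append, List.nil_append, List.nil_append,
      List.flatMap_append, ih]

-- B's per-row final cut list (definitionally the fold inside modify_array_alt)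
def rowFinalCuts (starttimelst endtimelst : List Int) (row : List Int) : List Nat :=
  let pos := buildPos row
  let cuts1 := starttimelst.foldl (fun cuts v =>
      let nw := newStartCuts (pos.getD v []) cuts
      if nw = [] then cuts else mergeCuts cuts nw) [0, row.length]
  endtimelst.foldl (fun cuts v =>
      let nw := newEndCuts (pos.getD v []) cuts
      if nw = [] then cuts else mergeCuts cuts nw) cuts1

lemma per_row (s e : List Int) (row : List Int) :
    passFold false e (passFold true s [row]) = segsB row (rowFinalCuts s e row) := by
  have h0 : ([row] : List (List Int)) = segsB row [0, row.length] := by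
    show [row] = [(row.drop 0).take (row.length - 0)]
    simp
  have hch0 : ([0, row.length] : List Nat).IsChain (· ≤ ·) := by
    simp [List.isChain_cons_cons]
  have hbd0 : ∀ x ∈ ([0, row.length] : List Nat), x ≤ row.length := by
    intro x hx
    simp at hx
    rcases hx with rfl | rfl <;> omega
  obtain ⟨h1, c1, b1⟩ := foldPass row true startCut newStartCuts
    (fun occ cuts => newStartCuts_eq occ cuts)
    (fun v a b ha hb => bridge_start row v a b ha hb)
    (fun occ a b c h => startCut_lt occ a b c h)
    s [0, row.length] hch0 hbd0
  obtain ⟨h2, _, _⟩ := foldPass row false endCut newEndCuts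
    (fun occ cuts => newEndCuts_eq occ cuts)
    (fun v a b ha hb => bridge_end row v a b ha hb)
    (fun occ a b c h => endCut_lt occ a b c h)
    e _ c1 b1
  rw [h0]
  unfold passFold
  rw [h1, h2]
  rfl

lemma modify_array_flatMap (s e : List Int) :
    ∀ arr : List (List Int),
      modify_array arr s e = arr.flatMap (fun row => passFold false e (passFold true s [row])) := by
  intro arr
  induction arr with
  | nil =>
    show passFold false e (passFold true s []) = []
    rw [passFold_nil, passFold_nil]
  | cons row rest ihr =>
    have step : modify_array (row :: rest) s e
        = passFold false e (passFold true s [row]) ++ passFold false e (passFold true s rest) := by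
      show passFold false e (passFold true s ([row] ++ rest)) = _
      rw [foldPass_append, foldPass_append]
    rw [step, List.flatMap_cons, ← ihr]
    rfl

-- ===== VERDICT (by name: the statement is the Claim_ definition above) =====
theorem modify_array_spec : Claim_equal_modify_array := by
  intro arr s e _
  unfold Spec_modify_array
  have hB : modify_array_alt arr s e
      = arr.foldl (fun result row => result ++ segsB row (rowFinalCuts s e row)) [] := rfl
  rw [hB, PySem.List.foldl_append_eq_flatMap, List.nil_append, modify_array_flatMap s e arr]
  congr 1
  funext row
  exact per_row s e row
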